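-- pv_equiv track=rewrite | github.com/Takagi-v/RankKV | rankkv/budget_allocation.py | allocate_budget_uniform
-- ===== SOURCE A (Python) =====
-- from typing import List, Dict, Optional, Union, Callable
--
-- def allocate_budget_uniform(
--     num_layers: int,
--     total_budget: int,
-- ) -> List[int]:
--     """
--     均匀分配Budget（作为baseline对比）
--
--     每层分配相同的budget
--
--     Args:
--         num_layers: 层数
--         total_budget: 总budget
--
--     Returns:
--         budgets: 每层分配的budget列表
--     """
--     base_budget = total_budget // num_layers
--     remainder = total_budget % num_layers
--
--     budgets = [base_budget] * num_layers
--
--     # 把余数分配给前几层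
--     for i in range(remainder):
--         budgets[i] += 1
--
--     return budgets
-- ===== SOURCE B (Python) =====
-- def allocate_budget_uniform(
--     num_layers: int,
--     total_budget: int,
-- ):
--     # Per-layer closed form: layer i receives ceil((total_budget - i) / num_layers),
--     # i.e. (total_budget + num_layers - 1 - i) // num_layers.  No remainder is
--     # computed and no list is mutated: each slot's budget is an independent formula.
--     return [(total_budget + num_layers - 1 - i) // num_layers
--             for i in range(num_layers)]
-- ===== Notes on version B (the rewrite author's own statement) =====
-- stated objective: alternative
-- what changed: Replaces A's replicate-then-increment-the-first-remainder-slots loop with a per-index closed form: layer i gets (total_budget + num_layers - 1 - i) // num_layers, so no remainder, no mutation and no second pass.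
import Mathlib
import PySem

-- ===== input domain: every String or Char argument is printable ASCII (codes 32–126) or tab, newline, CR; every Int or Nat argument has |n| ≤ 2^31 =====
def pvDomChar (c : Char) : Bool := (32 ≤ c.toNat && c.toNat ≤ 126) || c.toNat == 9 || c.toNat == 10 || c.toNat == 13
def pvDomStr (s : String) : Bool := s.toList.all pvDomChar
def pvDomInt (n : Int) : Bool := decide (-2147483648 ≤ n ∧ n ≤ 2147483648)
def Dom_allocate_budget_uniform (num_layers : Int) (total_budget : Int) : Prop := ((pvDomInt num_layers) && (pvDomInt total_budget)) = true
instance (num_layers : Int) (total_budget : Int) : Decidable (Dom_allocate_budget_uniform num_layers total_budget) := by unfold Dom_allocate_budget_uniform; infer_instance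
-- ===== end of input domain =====

-- B replaces A's replicate-then-increment loop by a per-index closed form per layer (objective: alternative).


-- ===== PORT A =====
def allocate_budget_uniform (num_layers : Int) (total_budget : Int) : List Int :=
  let base_budget := PySem.Int.floordiv total_budget num_layers
  let remainder := PySem.Int.mod total_budget num_layers
  let budgets := List.replicate num_layers.toNat base_budget
  (PySem.List.pyRange 0 remainder 1).foldl
    (fun bs i => PySem.List.pySetD bs i (PySem.List.pyGetD bs i 0 + 1)) budgets

-- ===== PORT B =====
def allocate_budget_uniform_alt (num_layers : Int) (total_budget : Int) : List Int :=
  (PySem.List.pyRange 0 num_layers 1).map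
    (fun i => PySem.Int.floordiv (total_budget + num_layers - 1 - i) num_layers)

-- ===== PRECONDITION & SPEC =====
-- Pre_ excludes exactly num_layers = 0, where Python A raises ZeroDivisionError.
def Pre_allocate_budget_uniform (num_layers : Int) (total_budget : Int) : Prop := num_layers ≠ 0
instance (num_layers : Int) (total_budget : Int) : Decidable (Pre_allocate_budget_uniform num_layers total_budget) := by unfold Pre_allocate_budget_uniform; infer_instance
def pvWitness_allocate_budget_uniform : Int × Int := (4, 10)
def Spec_allocate_budget_uniform (num_layers : Int) (total_budget : Int) (out : List Int) : Prop := out = allocate_budget_uniform_alt num_layers total_budget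
instance (num_layers : Int) (total_budget : Int) (out : List Int) : Decidable (Spec_allocate_budget_uniform num_layers total_budget out) := by unfold Spec_allocate_budget_uniform; infer_instance

-- ===== CLAIM (what is proved, stated in full; the proofs are below) =====
def Claim_equal_allocate_budget_uniform : Prop := ∀ (num_layers : Int) (total_budget : Int), Dom_allocate_budget_uniform num_layers total_budget → Pre_allocate_budget_uniform num_layers total_budget → Spec_allocate_budget_uniform num_layers total_budget (allocate_budget_uniform num_layers total_budget)

-- ===== LEMMAS AND PROOFS =====

-- A's increment loop on the first k slots of 'replicate m b' produces the two segments.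
theorem incr_loop_segments (b : Int) (k m : Nat) (hkm : k ≤ m) :
    (PySem.List.pyRange 0 (k : Int) 1).foldl
      (fun bs i => PySem.List.pySetD bs i (PySem.List.pyGetD bs i 0 + 1))
      (List.replicate m b)
    = List.replicate k (b + 1) ++ List.replicate (m - k) b := by
  induction k with
  | zero => simp [PySem.List.pyRange]
  | succ k ih =>
    have hk : k ≤ m := Nat.le_of_succ_le hkm
    have hlt : k < m := hkm
    have hrange : PySem.List.pyRange 0 ((k + 1 : Nat) : Int) 1
        = PySem.List.pyRange 0 (k : Int) 1 ++ [(k : Int)] := by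
      have := PySem.List.pyRange_one_succ_right (a := 0) (b := (k : Int)) (by positivity)
      simpa [show ((k + 1 : Nat) : Int) = (k : Int) + 1 by push_cast; ring] using this
    rw [hrange, List.foldl_append, ih hk]
    simp only [List.foldl_cons, List.foldl_nil]
    have hget : PySem.List.pyGetD (List.replicate k (b + 1) ++ List.replicate (m - k) b) (k : Int) 0 = b := by
      rw [PySem.List.pyGetD_natCast]
      simp [List.getD, Nat.sub_pos_of_lt hlt]
    rw [hget, PySem.List.pySetD_of_nonneg]
    rw [show ((k : Int)).toNat = k by simp]
    rw [List.set_append_right _ _ (by simp)]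
    have hmk : m - k = (m - (k + 1)) + 1 := by omega
    rw [hmk, List.replicate_succ]
    · simp only [List.length_replicate, Nat.sub_self, List.set_cons_zero]
      rw [List.replicate_succ' (n := k)]
      simp
    · exact Int.natCast_nonneg k

-- The per-index closed form: for 0 < n, t = q*n + r (0 ≤ r < n, q = t.fdiv n),
-- (t + n - 1 - i) / n is q + 1 for i < r and q for r ≤ i < n.
theorem closed_form_elem (n t i : Int) (hn : 0 < n) (hi0 : 0 ≤ i) (hin : i < n) :
    PySem.Int.floordiv (t + n - 1 - i) n
      = if i < PySem.Int.mod t n then PySem.Int.floordiv t n + 1 else PySem.Int.floordiv t n := by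
  set q := PySem.Int.floordiv t n with hq
  set r := PySem.Int.mod t n with hr
  have hid : q * n + r = t := PySem.Int.floordiv_mul_add_mod t n
  have hr0 : 0 ≤ r := PySem.Int.mod_nonneg (a := t) hn
  have hrn : r < n := PySem.Int.mod_lt (a := t) hn
  rw [PySem.Int.floordiv_eq_iff_of_pos (b := n) hn]
  split_ifs with h
  · constructor <;> nlinarith
  · constructor <;> nlinarith

-- For 0 < n, B's map over range(n) equals the two segments A's loop produces.
theorem map_closed_form_segments (n t : Int) (hn : 0 < n) :
    (PySem.List.pyRange 0 n 1).map
      (fun i => PySem.Int.floordiv (t + n - 1 - i) n)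
    = List.replicate (PySem.Int.mod t n).toNat (PySem.Int.floordiv t n + 1) ++
        List.replicate (n - PySem.Int.mod t n).toNat (PySem.Int.floordiv t n) := by
  have hr0 : 0 ≤ PySem.Int.mod t n := PySem.Int.mod_nonneg (a := t) hn
  have hrn : PySem.Int.mod t n < n := PySem.Int.mod_lt (a := t) hn
  apply List.ext_getElem
  · simp [PySem.List.length_pyRange_one]; omega
  · intro i h1 h2
    have hlen : i < n.toNat := by
      simpa [PySem.List.length_pyRange_one] using h1
    rw [List.getElem_map, PySem.List.getElem_pyRange_one]
    have hi0 : (0 : Int) ≤ (i : Int) := Int.natCast_nonneg i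
    have hin : ((i : Int)) < n := by omega
    rw [show (0 : Int) + (i : Int) = (i : Int) by ring]
    rw [closed_form_elem n t i hn hi0 hin]
    by_cases hcase : ((i : Int)) < PySem.Int.mod t n
    · rw [if_pos hcase, List.getElem_append_left (by simp; omega)]
      simp
    · rw [if_neg hcase, List.getElem_append_right (by simp; omega)]
      simp

-- ===== VERDICT (by name: the statement is the Claim_ definition above) =====
theorem allocate_budget_uniform_spec : Claim_equal_allocate_budget_uniform := by
  intro n t _ hn
  unfold Spec_allocate_budget_uniform allocate_budget_uniform allocate_budget_uniform_alt
  simp only []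
  rcases lt_or_gt_of_ne hn with hneg | hpos
  · -- n < 0 : both sides are []
    obtain ⟨h1, h2⟩ := PySem.Int.mod_neg_bounds (a := t) hneg
    have hrange : PySem.List.pyRange 0 (PySem.Int.mod t n) 1 = [] :=
      PySem.List.pyRange_one_eq_nil (by omega)
    have hrangeB : PySem.List.pyRange 0 n 1 = [] :=
      PySem.List.pyRange_one_eq_nil (by omega)
    simp [hrange, hrangeB, show n.toNat = 0 by omega]
  · -- n > 0
    have h0 : 0 ≤ PySem.Int.mod t n := PySem.Int.mod_nonneg (a := t) hpos
    have hlt : PySem.Int.mod t n < n := PySem.Int.mod_lt (a := t) hpos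
    rw [map_closed_form_segments n t hpos]
    rw [show PySem.List.pyRange 0 (PySem.Int.mod t n) 1
        = PySem.List.pyRange 0 (((PySem.Int.mod t n).toNat : Int)) 1 by
      rw [Int.toNat_of_nonneg h0]]
    rw [incr_loop_segments _ _ _ (by omega)]
    congr 1
    congr 1
    omega
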